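-- pv_equiv track=rewrite | github.com/HongyuZh/AARC | scheduler/DAG.py | sort_by_edges
-- ===== SOURCE A (Python) =====
-- from itertools import groupby
--
-- def sort_by_edges(arr: list):
--     def get_first_element(item):
--         return item[0]
--
--     def get_last_element(item):
--         return item[-1]
--
--     sort_by_start = [list(group) for key, group in groupby(arr, key=get_first_element)]
--     sort_by_end = []
--     for sub_array in sort_by_start:
--         sort_by_end += [
--             list(group) for key, group in groupby(sub_array, key=get_last_element)
--         ]
--     return sort_by_end
-- ===== SOURCE B (Python) =====
-- def sort_by_edges(arr: list):
--     if not arr: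
--         return []
--     result = []
--     key = (arr[0][0], arr[0][-1])
--     cur = [arr[0]]
--     for item in arr[1:]:
--         k = (item[0], item[-1])
--         if k == key:
--             cur.append(item)
--         else:
--             result.append(cur)
--             cur = [item]
--             key = k
--     result.append(cur)
--     return result
-- ===== Notes on version B (the rewrite author's own statement) =====
-- stated objective: simpler
-- what changed: Replaced the two nested itertools.groupby passes (group by first element, then re-group each group by last element) with one explicit single pass that maintains the current run and its (first, last) key.
import Mathlib
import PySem

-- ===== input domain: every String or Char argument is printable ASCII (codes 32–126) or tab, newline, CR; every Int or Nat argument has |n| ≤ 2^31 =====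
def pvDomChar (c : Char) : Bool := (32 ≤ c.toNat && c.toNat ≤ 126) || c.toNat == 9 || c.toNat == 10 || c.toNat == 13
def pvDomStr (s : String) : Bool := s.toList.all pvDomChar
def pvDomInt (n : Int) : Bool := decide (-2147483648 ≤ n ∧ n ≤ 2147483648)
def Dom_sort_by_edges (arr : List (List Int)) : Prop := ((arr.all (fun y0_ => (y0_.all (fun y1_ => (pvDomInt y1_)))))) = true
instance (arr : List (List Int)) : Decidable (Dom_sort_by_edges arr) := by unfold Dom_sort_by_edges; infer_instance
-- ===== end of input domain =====

-- B replaces A's two nested itertools.groupby passes (by first element, then each group by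
-- last element) with one explicit single pass maintaining the current run and its
-- (first, last) key; objective: simpler.

-- ===== PORT A =====
-- get_first_element(item) = item[0]; get_last_element(item) = item[-1].
-- Pre_ restricts to nonempty inner lists, where item[0] = headI and item[-1] = getLastD 0 are exact.
def keyFirst (l : List Int) : Int := l.headI
def keyLast (l : List Int) : Int := l.getLastD 0

-- port of itertools.groupby(·, key=f) followed by list(group): maximal consecutive runs of equal key
def grp {κ : Type} [DecidableEq κ] (f : List Int → κ) : List (List Int) → List (List (List Int))
  | [] => []
  | x :: xs =>
      (x :: xs.takeWhile (fun y => decide (f y = f x))) ::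
        grp f (xs.dropWhile (fun y => decide (f y = f x)))
  termination_by l => l.length
  decreasing_by
    simp only [List.length_cons]
    exact Nat.lt_succ_of_le (List.length_dropWhile_le _ _)

def sort_by_edges (arr : List (List Int)) : List (List (List Int)) :=
  let sort_by_start := grp keyFirst arr
  sort_by_start.foldl (fun acc sub => acc ++ grp keyLast sub) []

-- ===== PORT B =====
def keyOf (l : List Int) : Int × Int := (keyFirst l, keyLast l)   -- k = (item[0], item[-1])

-- the loop of Source B: state (result, key, cur)
def altLoop (result : List (List (List Int))) (key : Int × Int) (cur : List (List Int)) :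
    List (List Int) → List (List (List Int))
  | [] => result ++ [cur]
  | item :: rest =>
      if keyOf item = key then altLoop result key (cur ++ [item]) rest
      else altLoop (result ++ [cur]) (keyOf item) [item] rest

def sort_by_edges_alt : List (List Int) → List (List (List Int))
  | [] => []
  | x :: xs => altLoop [] (keyOf x) [x] xs

-- ===== PRECONDITION & SPEC =====
-- Pre_ excludes arrays containing an empty inner list, on which both A and B raise IndexError at item[0].
def Pre_sort_by_edges (arr : List (List Int)) : Prop := ∀ l ∈ arr, l ≠ []
instance (arr : List (List Int)) : Decidable (Pre_sort_by_edges arr) := by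
  unfold Pre_sort_by_edges; infer_instance
def pvWitness_sort_by_edges : List (List Int) := [[1, 2], [1, 5, 2], [3, 2]]

def Spec_sort_by_edges (arr : List (List Int)) (out : List (List (List Int))) : Prop := out = sort_by_edges_alt arr
instance (arr : List (List Int)) (out : List (List (List Int))) : Decidable (Spec_sort_by_edges arr out) := by unfold Spec_sort_by_edges; infer_instance

-- ===== CLAIM (what is proved, stated in full; the proofs are below) =====
def Claim_equal_sort_by_edges : Prop := ∀ (arr : List (List Int)), Dom_sort_by_edges arr → Pre_sort_by_edges arr → Spec_sort_by_edges arr (sort_by_edges arr)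

-- ===== LEMMAS AND PROOFS =====

-- the accumulated result is a prefix of the loop's output
theorem altLoop_acc (rest : List (List Int)) :
    ∀ (res : List (List (List Int))) (key : Int × Int) (cur : List (List Int)),
      altLoop res key cur rest = res ++ altLoop [] key cur rest := by
  induction rest with
  | nil => intro res key cur; simp [altLoop]
  | cons item rest ih =>
      intro res key cur
      by_cases h : keyOf item = key
      · simp only [altLoop, if_pos h]; exact ih _ _ _
      · simp only [altLoop, if_neg h]
        rw [ih (res ++ [cur]), ih ([] ++ [cur])]
        simp

-- the loop finishes the current run, then groups the remainder by the pair key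
theorem altLoop_eq_grp (rest : List (List Int)) :
    ∀ (key : Int × Int) (cur : List (List Int)),
      altLoop [] key cur rest =
        (cur ++ rest.takeWhile (fun y => decide (keyOf y = key))) ::
          grp keyOf (rest.dropWhile (fun y => decide (keyOf y = key))) := by
  induction rest with
  | nil => intro key cur; simp [altLoop, grp]
  | cons item rest ih =>
      intro key cur
      by_cases h : keyOf item = key
      · simp only [altLoop, List.takeWhile_cons, List.dropWhile_cons, h, decide_true, List.nil_append]
        rw [ih key (cur ++ [item])]
        simp
      · simp only [altLoop, List.takeWhile_cons, List.dropWhile_cons, h, if_false, decide_false]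
        rw [altLoop_acc, ih (keyOf item) [item]]
        simp [grp]

theorem alt_eq_grp (arr : List (List Int)) : sort_by_edges_alt arr = grp keyOf arr := by
  cases arr with
  | nil => simp [sort_by_edges_alt, grp]
  | cons x xs =>
      rw [sort_by_edges_alt, altLoop_eq_grp, grp]
      simp

theorem takeWhile_and {α : Type} (p q : α → Bool) (xs : List α) :
    xs.takeWhile (fun y => p y && q y) = (xs.takeWhile p).takeWhile q := by
  induction xs with
  | nil => rfl
  | cons x xs ih =>
      cases hp : p x <;> cases hq : q x <;> simp [hp, hq, ih]

theorem dropWhile_and {α : Type} (p q : α → Bool) (xs : List α) :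
    xs.dropWhile (fun y => p y && q y) = (xs.takeWhile p).dropWhile q ++ xs.dropWhile p := by
  induction xs with
  | nil => rfl
  | cons x xs ih =>
      cases hp : p x
      · simp [hp]
      · cases hq : q x
        · simp [hp, hq, List.takeWhile_append_dropWhile]
        · simp [hp, hq, ih]

theorem takeWhile_dropWhile_nil {α : Type} (p : α → Bool) (xs : List α) :
    (xs.dropWhile p).takeWhile p = [] := by
  induction xs with
  | nil => rfl
  | cons x xs ih =>
      cases hp : p x <;> simp [hp, ih]

theorem takeWhile_append_of_all {α : Type} (p : α → Bool) (u r : List α)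
    (h : ∀ a ∈ u, p a = true) : (u ++ r).takeWhile p = u ++ r.takeWhile p := by
  induction u with
  | nil => rfl
  | cons a u ih =>
      have ih' := ih fun b hb => h b (by simp [hb])
      simp [h a (by simp), ih']

theorem dropWhile_append_of_all {α : Type} (p : α → Bool) (u r : List α)
    (h : ∀ a ∈ u, p a = true) : (u ++ r).dropWhile p = r.dropWhile p := by
  induction u with
  | nil => rfl
  | cons a u ih =>
      simp only [List.cons_append, List.dropWhile_cons, h a (by simp)]
      exact ih fun a ha => h a (by simp [ha])

theorem dropWhile_eq_self_of_takeWhile_nil {α : Type} (p : α → Bool) (r : List α)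
    (h : r.takeWhile p = []) : r.dropWhile p = r := by
  cases r with
  | nil => rfl
  | cons a r =>
      cases hp : p a
      · simp [hp]
      · simp [hp] at h

-- a run of equal key splits off as one group
theorem grp_append_run {κ : Type} [DecidableEq κ] (f : List Int → κ) (k : κ)
    (y : List Int) (u' r : List (List Int))
    (hy : f y = k) (hu : ∀ a ∈ u', f a = k)
    (hr : r.takeWhile (fun a => decide (f a = k)) = []) :
    grp f ((y :: u') ++ r) = (y :: u') :: grp f r := by
  have hall : ∀ a ∈ u', (fun a => decide (f a = f y)) a = true := by
    intro a ha; simp [hy, hu a ha]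
  rw [List.cons_append, grp, takeWhile_append_of_all _ _ _ hall,
    dropWhile_append_of_all _ _ _ hall]
  rw [show (fun a => decide (f a = f y)) = (fun a => decide (f a = k)) by simp [hy]]
  rw [hr, dropWhile_eq_self_of_takeWhile_nil _ _ hr]
  simp

theorem pred_pair (x : List Int) :
    (fun y => decide (keyOf y = keyOf x)) =
      (fun y => decide (keyFirst y = keyFirst x) && decide (keyLast y = keyLast x)) := by
  funext y
  by_cases h1 : keyFirst y = keyFirst x <;> by_cases h2 : keyLast y = keyLast x <;>
    simp [keyOf, Prod.ext_iff, h1, h2]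

-- main lemma: the nested grouping equals grouping by the pair key
theorem nested_eq_pair : ∀ (n : ℕ) (xs : List (List Int)), xs.length ≤ n →
    (grp keyFirst xs).flatMap (grp keyLast) = grp keyOf xs := by
  intro n
  induction n with
  | zero =>
      intro xs h
      have : xs = [] := List.eq_nil_of_length_eq_zero (Nat.le_zero.mp h)
      subst this; simp [grp]
  | succ n ih =>
      intro xs h
      match xs with
      | [] => simp [grp]
      | x :: xs' =>
        have hlen : xs'.length ≤ n := by simpa using Nat.lt_succ_iff.mp (Nat.lt_of_lt_of_le (by simp) h)
        set p1 : List Int → Bool := fun y => decide (keyFirst y = keyFirst x) with hp1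
        set p2 : List Int → Bool := fun y => decide (keyLast y = keyLast x) with hp2
        set t1 := xs'.takeWhile p1 with ht1
        set r1 := xs'.dropWhile p1 with hr1
        set u := t1.dropWhile p2 with hu
        have hgoal2 : grp keyLast u ++ (grp keyFirst r1).flatMap (grp keyLast)
            = grp keyOf (u ++ r1) := by
          have hr1len : r1.length ≤ n := le_trans (List.length_dropWhile_le _ _) hlen
          match hU : u with
          | [] =>
              simp only [grp, List.nil_append]
              exact ih r1 hr1len
          | y :: u'' =>
              have hmemu : ∀ a ∈ u, p1 a = true := by
                intro a ha
                have : a ∈ t1 := (List.dropWhile_sublist _).subset ha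
                exact List.mem_takeWhile_imp this
              have hy1 : keyFirst y = keyFirst x := by
                have := hmemu y (by rw [hU]; simp)
                simpa [hp1] using this
              have hu1 : ∀ a ∈ u'', keyFirst a = keyFirst x := by
                intro a ha
                have := hmemu a (by rw [hU]; simp [ha])
                simpa [hp1] using this
              have hrt : r1.takeWhile (fun a => decide (keyFirst a = keyFirst x)) = [] := by
                rw [hr1]; exact takeWhile_dropWhile_nil _ _
              have hsplit := grp_append_run keyFirst (keyFirst x) y u'' r1 hy1 hu1 hrt
              have hulen : ((y :: u'') ++ r1).length ≤ n := by
                have h1 : u.length ≤ t1.length := List.length_dropWhile_le _ _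
                have h2 : t1.length + r1.length = xs'.length := by
                  conv_rhs => rw [← List.takeWhile_append_dropWhile (p := p1) (l := xs')]
                  rw [List.length_append]
                have h3 : ((y :: u'') ++ r1).length = u.length + r1.length := by
                  rw [hU, List.length_append]
                have h4 : u.length + r1.length ≤ xs'.length := by omega
                omega
              calc grp keyLast (y :: u'') ++ (grp keyFirst r1).flatMap (grp keyLast)
                  = (grp keyFirst ((y :: u'') ++ r1)).flatMap (grp keyLast) := by
                    rw [hsplit]; simp [List.flatMap_cons]
                _ = grp keyOf ((y :: u'') ++ r1) := ih _ hulen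
        -- unfold both sides once
        rw [grp, grp, List.flatMap_cons, grp]
        rw [pred_pair x, takeWhile_and, dropWhile_and]
        rw [← hp1, ← hp2, ← ht1, ← hr1, ← hu]
        simp only [List.cons_append]
        rw [hgoal2]

theorem a_eq_flatMap (arr : List (List Int)) :
    sort_by_edges arr = (grp keyFirst arr).flatMap (grp keyLast) := by
  unfold sort_by_edges
  rw [PySem.List.foldl_append_eq_flatMap]
  simp

-- ===== VERDICT (by name: the statement is the Claim_ definition above) =====
theorem sort_by_edges_spec : Claim_equal_sort_by_edges := by
  intro arr _ _
  unfold Spec_sort_by_edges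
  rw [a_eq_flatMap, nested_eq_pair arr.length arr le_rfl, alt_eq_grp]
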